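-- pv_equiv track=rewrite | github.com/farabimahmud/accelerator | src/allreduce/kernighan_lin.py | find_best_edge
-- ===== SOURCE A (Python) =====
-- def find_best_edge(adjacency_matrix, partitions, parent, to_cluster):
--     nrows = len(partitions)
--     row = parent
--     g = 0
--     candidates = [-1]
--     for col in range(nrows):
--         if col == row or partitions[col] != to_cluster:
--             continue
--
--         cost = adjacency_matrix[row][col]
--         if cost > g:
--             candidates = []
--         if cost >= g:
--             candidates.append(col)
--             g = cost
--
--     return candidates, g
-- ===== SOURCE B (Python) =====
-- def _valid_cols(partitions, parent, to_cluster):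
--     return [c for c in range(len(partitions)) if c != parent and partitions[c] == to_cluster]
--
-- def find_best_edge(adjacency_matrix, partitions, parent, to_cluster):
--     cols = _valid_cols(partitions, parent, to_cluster)
--     g = 0
--     for c in cols:
--         cost = adjacency_matrix[parent][c]
--         if cost > g:
--             g = cost
--     candidates = [] if g > 0 else [-1]
--     candidates += [c for c in cols if adjacency_matrix[parent][c] == g]
--     return candidates, g
-- ===== Notes on version B (the rewrite author's own statement) =====
-- stated objective: alternative
-- what changed: Replaces A's single fused pass that maintains a running max together with its tie-list (resetting it on each new max) by a decomposition: filter the valid columns once, compute the maximum cost in one pass, then collect the columns attaining it in a second pass, with the [-1] sentinel reconstructed only when the max is not positive.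
import Mathlib
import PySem

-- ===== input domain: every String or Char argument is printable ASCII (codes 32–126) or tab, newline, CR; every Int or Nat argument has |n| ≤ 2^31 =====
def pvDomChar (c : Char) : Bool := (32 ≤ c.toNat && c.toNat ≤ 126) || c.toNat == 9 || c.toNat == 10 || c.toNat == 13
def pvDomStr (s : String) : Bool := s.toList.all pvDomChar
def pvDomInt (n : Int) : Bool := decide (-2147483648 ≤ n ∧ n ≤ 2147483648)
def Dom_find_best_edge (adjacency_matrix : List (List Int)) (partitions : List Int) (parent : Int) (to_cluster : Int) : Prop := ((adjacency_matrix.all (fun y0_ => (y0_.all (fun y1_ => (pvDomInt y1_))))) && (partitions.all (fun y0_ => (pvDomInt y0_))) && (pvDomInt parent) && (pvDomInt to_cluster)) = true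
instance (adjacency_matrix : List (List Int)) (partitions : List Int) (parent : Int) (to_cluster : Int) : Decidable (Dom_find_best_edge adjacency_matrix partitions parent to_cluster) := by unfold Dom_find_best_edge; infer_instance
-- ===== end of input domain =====

-- B replaces A's fused max+tie-list loop by a decomposition (valid columns, max pass, collect pass); objective: alternative, same O(n) cost.


-- ===== PORT A =====
-- adjacency_matrix[row][col], as both Pythons compute it: pyGet? is exact (negative parent wraps);
-- the .getD [] / .getD 0 defaults are reached only where Python raises IndexError, which
-- Pre_find_best_edge excludes.
def pvCost (adjacency_matrix : List (List Int)) (parent : Int) (c : Nat) : Int :=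
  ((PySem.List.pyGet? adjacency_matrix parent).getD []).getD c 0

-- A's loop body: skip col == row / wrong partition, else reset tie-list on a new max and append on ties.
def pvStepA (adjacency_matrix : List (List Int)) (partitions : List Int) (parent : Int) (to_cluster : Int)
    (st : Int × List Int) (col : Nat) : Int × List Int :=
  if (col : Int) = parent ∨ partitions.getD col 0 ≠ to_cluster then st
  else
    let cost := pvCost adjacency_matrix parent col
    let candidates := if cost > st.1 then ([] : List Int) else st.2
    if cost ≥ st.1 then (cost, candidates ++ [(col : Int)]) else (st.1, candidates)

def find_best_edge (adjacency_matrix : List (List Int)) (partitions : List Int) (parent : Int) (to_cluster : Int) : List Int × Int :=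
  let res := (List.range partitions.length).foldl (pvStepA adjacency_matrix partitions parent to_cluster) (0, [-1])
  (res.2, res.1)

-- ===== PORT B =====
-- B's helper _valid_cols: the columns the loop considers.
def pvValidCols (partitions : List Int) (parent : Int) (to_cluster : Int) : List Nat :=
  (List.range partitions.length).filter (fun c => decide ((c : Int) ≠ parent) && decide (partitions.getD c 0 = to_cluster))

def find_best_edge_alt (adjacency_matrix : List (List Int)) (partitions : List Int) (parent : Int) (to_cluster : Int) : List Int × Int :=
  let cols := pvValidCols partitions parent to_cluster
  let g := cols.foldl (fun m c => if pvCost adjacency_matrix parent c > m then pvCost adjacency_matrix parent c else m) 0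
  let candidates : List Int := if g > 0 then [] else [-1]
  (candidates ++ (cols.filter (fun (c : Nat) => decide (pvCost adjacency_matrix parent c = g))).map (fun (c : Nat) => (c : Int)), g)

-- ===== PRECONDITION & SPEC =====
-- Pre_ excludes exactly the inputs where Python A raises IndexError: some valid column exists but
-- adjacency_matrix[parent] or its entry at that column does not.
def Pre_find_best_edge (adjacency_matrix : List (List Int)) (partitions : List Int) (parent : Int) (to_cluster : Int) : Prop :=
  ∀ c ∈ List.range partitions.length, ((c : Int) ≠ parent ∧ partitions.getD c 0 = to_cluster) →
    (PySem.List.pyGet? adjacency_matrix parent).isSome ∧ c < ((PySem.List.pyGet? adjacency_matrix parent).getD []).length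
instance (adjacency_matrix : List (List Int)) (partitions : List Int) (parent : Int) (to_cluster : Int) : Decidable (Pre_find_best_edge adjacency_matrix partitions parent to_cluster) := by unfold Pre_find_best_edge; infer_instance

def pvWitness_find_best_edge : List (List Int) × List Int × Int × Int := ([[0, 2, 3], [2, 0, 1], [3, 1, 0]], [0, 1, 1], 0, 1)

def Spec_find_best_edge (adjacency_matrix : List (List Int)) (partitions : List Int) (parent : Int) (to_cluster : Int) (out : List Int × Int) : Prop := out = find_best_edge_alt adjacency_matrix partitions parent to_cluster
instance (adjacency_matrix : List (List Int)) (partitions : List Int) (parent : Int) (to_cluster : Int) (out : List Int × Int) : Decidable (Spec_find_best_edge adjacency_matrix partitions parent to_cluster out) := by unfold Spec_find_best_edge; infer_instance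

-- ===== CLAIM (what is proved, stated in full; the proofs are below) =====
def Claim_equal_find_best_edge : Prop := ∀ (adjacency_matrix : List (List Int)) (partitions : List Int) (parent : Int) (to_cluster : Int), Dom_find_best_edge adjacency_matrix partitions parent to_cluster → Pre_find_best_edge adjacency_matrix partitions parent to_cluster → Spec_find_best_edge adjacency_matrix partitions parent to_cluster (find_best_edge adjacency_matrix partitions parent to_cluster)

-- ===== LEMMAS AND PROOFS =====

-- Invariant of A's fused loop over an arbitrary column list l, phrased in B's three-stage shape:
-- first component = B's max g, second = B's sentinel-prefixed tie list; plus 0 ≤ g and that every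
-- valid column's cost is ≤ g (needed to show a strictly larger cost empties the tie list).
lemma pv_loop (adjacency_matrix : List (List Int)) (partitions : List Int) (parent : Int) (to_cluster : Int)
    (l : List Nat) :
    List.foldl (pvStepA adjacency_matrix partitions parent to_cluster) (0, [-1]) l =
      (List.foldl (fun m c => if pvCost adjacency_matrix parent c > m then pvCost adjacency_matrix parent c else m) 0 (List.filter (fun (c : Nat) => decide ((c : Int) ≠ parent) && decide (partitions.getD c 0 = to_cluster)) l),
       (if List.foldl (fun m c => if pvCost adjacency_matrix parent c > m then pvCost adjacency_matrix parent c else m) 0 (List.filter (fun (c : Nat) => decide ((c : Int) ≠ parent) && decide (partitions.getD c 0 = to_cluster)) l) > 0 then ([] : List Int) else [-1]) ++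
         List.map (fun (c : Nat) => (c : Int))
           (List.filter (fun (c : Nat) => decide (pvCost adjacency_matrix parent c = List.foldl (fun m c => if pvCost adjacency_matrix parent c > m then pvCost adjacency_matrix parent c else m) 0 (List.filter (fun (c : Nat) => decide ((c : Int) ≠ parent) && decide (partitions.getD c 0 = to_cluster)) l))) (List.filter (fun (c : Nat) => decide ((c : Int) ≠ parent) && decide (partitions.getD c 0 = to_cluster)) l)))
    ∧ 0 ≤ List.foldl (fun m c => if pvCost adjacency_matrix parent c > m then pvCost adjacency_matrix parent c else m) 0 (List.filter (fun (c : Nat) => decide ((c : Int) ≠ parent) && decide (partitions.getD c 0 = to_cluster)) l)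
    ∧ ∀ c ∈ (List.filter (fun (c : Nat) => decide ((c : Int) ≠ parent) && decide (partitions.getD c 0 = to_cluster)) l), pvCost adjacency_matrix parent c ≤ List.foldl (fun m c => if pvCost adjacency_matrix parent c > m then pvCost adjacency_matrix parent c else m) 0 (List.filter (fun (c : Nat) => decide ((c : Int) ≠ parent) && decide (partitions.getD c 0 = to_cluster)) l) := by
  induction l using List.reverseRecOn with
  | nil => exact ⟨by simp, le_refl 0, by simp⟩
  | append_singleton l c ih =>
    obtain ⟨h1, h2, h3⟩ := ih
    by_cases hp : (decide ((c : Int) ≠ parent) && decide (partitions.getD c 0 = to_cluster)) = true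
    · obtain ⟨hp1, hp2⟩ : ¬(c : Int) = parent ∧ partitions[c]?.getD 0 = to_cluster := by simpa using hp
      have hp2' : partitions.getD c 0 = to_cluster := by simpa using hp2
      have hc : ¬((c : Int) = parent ∨ partitions.getD c 0 ≠ to_cluster) := by
        intro h
        rcases h with h | h
        · exact hp1 h
        · exact h hp2'
      have hfc : List.filter (fun (c : Nat) => decide ((c : Int) ≠ parent) && decide (partitions.getD c 0 = to_cluster)) [c] = [c] := by simp [hp1, hp2]
      rw [List.foldl_append, List.foldl_cons, List.foldl_nil, h1, List.filter_append, hfc,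
          List.foldl_append, List.foldl_cons, List.foldl_nil, pvStepA, if_neg hc]
      rw [List.filter_append]
      simp only [List.filter_cons, List.filter_nil]
      by_cases hgt : pvCost adjacency_matrix parent c > List.foldl (fun m c => if pvCost adjacency_matrix parent c > m then pvCost adjacency_matrix parent c else m) 0 (List.filter (fun (c : Nat) => decide ((c : Int) ≠ parent) && decide (partitions.getD c 0 = to_cluster)) l)
      · have hg0 : pvCost adjacency_matrix parent c > 0 := by omega
        have hfilnil : List.filter (fun (d : Nat) => decide (pvCost adjacency_matrix parent d = pvCost adjacency_matrix parent c)) (List.filter (fun (c : Nat) => decide ((c : Int) ≠ parent) && decide (partitions.getD c 0 = to_cluster)) l) = [] := by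
          rw [List.filter_eq_nil_iff]
          intro d hd
          have := h3 d hd
          simp only [decide_eq_true_eq]
          omega
        refine ⟨?_, ?_, ?_⟩
        · simp only [if_pos hgt, if_pos (show pvCost adjacency_matrix parent c ≥ List.foldl (fun m c => if pvCost adjacency_matrix parent c > m then pvCost adjacency_matrix parent c else m) 0 (List.filter (fun (c : Nat) => decide ((c : Int) ≠ parent) && decide (partitions.getD c 0 = to_cluster)) l) from le_of_lt hgt), if_pos hg0, hfilnil]
          simp
        · simp only [if_pos hgt]
          omega
        · intro d hd
          simp only [if_pos hgt]
          rcases List.mem_append.mp hd with hd | hd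
          · have := h3 d hd
            omega
          · rcases List.mem_singleton.mp hd with rfl
            omega
      · refine ⟨?_, ?_, ?_⟩
        · by_cases hge : pvCost adjacency_matrix parent c ≥ List.foldl (fun m c => if pvCost adjacency_matrix parent c > m then pvCost adjacency_matrix parent c else m) 0 (List.filter (fun (c : Nat) => decide ((c : Int) ≠ parent) && decide (partitions.getD c 0 = to_cluster)) l)
          · have heq : pvCost adjacency_matrix parent c = List.foldl (fun m c => if pvCost adjacency_matrix parent c > m then pvCost adjacency_matrix parent c else m) 0 (List.filter (fun (c : Nat) => decide ((c : Int) ≠ parent) && decide (partitions.getD c 0 = to_cluster)) l) := by omega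
            simp only [if_neg hgt, if_pos hge, decide_eq_true heq, if_true]
            simp [heq]
          · have hne : ¬(pvCost adjacency_matrix parent c = List.foldl (fun m c => if pvCost adjacency_matrix parent c > m then pvCost adjacency_matrix parent c else m) 0 (List.filter (fun (c : Nat) => decide ((c : Int) ≠ parent) && decide (partitions.getD c 0 = to_cluster)) l)) := by omega
            simp only [if_neg hgt, if_neg hge, decide_eq_false hne]
            simp
        · simp only [if_neg hgt]
          exact h2
        · intro d hd
          simp only [if_neg hgt]
          rcases List.mem_append.mp hd with hd | hd
          · exact h3 d hd
          · rcases List.mem_singleton.mp hd with rfl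
            omega
    · have himp : ¬(c : Int) = parent → ¬ partitions[c]?.getD 0 = to_cluster := by
        intro h1' h2'
        exact hp (by simp [h1', h2'])
      have hc : (c : Int) = parent ∨ partitions.getD c 0 ≠ to_cluster := by
        by_cases h1' : (c : Int) = parent
        · exact Or.inl h1'
        · exact Or.inr (fun h2' => himp h1' (by simpa using h2'))
      have hfc : List.filter (fun (c : Nat) => decide ((c : Int) ≠ parent) && decide (partitions.getD c 0 = to_cluster)) [c] = [] := by simpa using himp
      rw [List.foldl_append, List.foldl_cons, List.foldl_nil, h1, List.filter_append, hfc,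
          List.append_nil, pvStepA, if_pos hc]
      exact ⟨rfl, h2, h3⟩

-- ===== VERDICT (by name: the statement is the Claim_ definition above) =====
theorem find_best_edge_spec : Claim_equal_find_best_edge := by
  intro adjacency_matrix partitions parent to_cluster _ _
  unfold Spec_find_best_edge find_best_edge find_best_edge_alt pvValidCols
  rw [(pv_loop adjacency_matrix partitions parent to_cluster (List.range partitions.length)).1]
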